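-- pv_equiv track=rewrite | github.com/ChenZha/Quantum-Computation | Programme/python/algorithm/Renyi Entropy/2 dimensions/evolution of Renyi Entropy_2d.py | generate_subsys
-- ===== SOURCE A (Python) =====
-- def generate_subsys(Num_qubits):
--     '''
--     generate subsystem
--     '''
--     import itertools
--     system = [i for i in range(Num_qubits)]
--     subsys = []
--     for jj in range(Num_qubits-1):
--         subsys.extend(list(itertools.combinations(system,jj+1)))
--     def funcfilter(x,xmap={}):
--         subx = tuple([ii for ii in system if ii not in x])
--         xstr = [str(x),str(subx)]
--         boolin = xstr[0] in xmap or xstr[1] in xmap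
--         xmap[xstr[0]]=1
--         xmap[xstr[1]]=1
--         return (not boolin)
--     subsys=list(filter(funcfilter,subsys))
--     return(subsys)
-- ===== SOURCE B (Python) =====
-- def generate_subsys(Num_qubits):
--     '''
--     generate subsystem
--     '''
--     import itertools
--     system = list(range(Num_qubits))
--     subsys = []
--     for k in range(1, Num_qubits):
--         if 2 * k < Num_qubits:
--             subsys.extend(itertools.combinations(system, k))
--         elif 2 * k == Num_qubits:
--             subsys.extend(c for c in itertools.combinations(system, k)
--                           if c < tuple(i for i in system if i not in c))
--     return subsys
-- ===== Notes on version B (the rewrite author's own statement) =====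
-- stated objective: faster
-- what changed: Instead of generating every size-1..n-1 combination and filtering with a stateful dict keyed by str(tuple), B selects representatives directly per size k: all combinations for 2k<n, only those lexicographically below their complement for 2k=n, none for 2k>n.
import Mathlib
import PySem

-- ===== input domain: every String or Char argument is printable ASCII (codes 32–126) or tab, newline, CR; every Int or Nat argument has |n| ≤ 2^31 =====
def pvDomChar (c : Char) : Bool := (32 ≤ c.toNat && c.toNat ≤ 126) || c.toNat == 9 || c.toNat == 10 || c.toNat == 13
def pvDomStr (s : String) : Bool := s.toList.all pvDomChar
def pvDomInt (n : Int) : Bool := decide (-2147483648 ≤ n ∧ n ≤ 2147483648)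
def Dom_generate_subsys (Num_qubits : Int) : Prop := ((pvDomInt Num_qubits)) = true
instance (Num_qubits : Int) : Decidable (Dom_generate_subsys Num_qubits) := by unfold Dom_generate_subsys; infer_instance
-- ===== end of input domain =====

-- B replaces A's generate-all-then-dedup-with-a-str-keyed-dict by direct selection of the
-- representative subsets per size (all for 2k<n, lexicographically-first of each complement
-- pair for 2k=n, none for 2k>n); measurably faster by a constant factor.

-- ===== PORT A =====
-- str(x) for a tuple x of ints (exact for Python's repr of int tuples: "()", "(a,)", "(a, b, …)")
def pyTupleChars (l : List Int) : List Char :=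
  match l with
  | [] => ['(', ')']
  | [a] => '(' :: (PySem.Int.toChars a ++ [',', ')'])
  | _ => '(' :: (PySem.Chars.join [',', ' '] (l.map PySem.Int.toChars) ++ [')'])

def pyTupleStr (l : List Int) : String := String.ofList (pyTupleChars l)

-- the body of A's funcfilter, as one step of the stateful filter (st = (kept list, xmap))
def pvStepA (system : List Int) (st : Array (List Int) × Std.HashMap String Int)
    (x : List Int) : Array (List Int) × Std.HashMap String Int :=
  let subx := system.filter (fun ii => !x.contains ii)
  let xstr := [pyTupleStr x, pyTupleStr subx]
  let boolin := st.2.contains (PySem.List.pyGetD xstr 0 "") || st.2.contains (PySem.List.pyGetD xstr 1 "")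
  let xmap := (st.2.insert (PySem.List.pyGetD xstr 0 "") 1).insert (PySem.List.pyGetD xstr 1 "") 1
  (if boolin then st.1 else st.1.push x, xmap)

def generate_subsys (Num_qubits : Int) : List (List Int) :=
  let system := PySem.List.pyRange 0 Num_qubits 1
  let subsys := (PySem.List.pyRange 0 (Num_qubits - 1) 1).foldl
    (fun acc jj => acc ++ PySem.List.combinations system (jj + 1).toNat) []
  let res := subsys.foldl (pvStepA system) (#[], ∅)
  res.1.toList

-- ===== PORT B =====
def generate_subsys_alt (Num_qubits : Int) : List (List Int) :=
  let system := PySem.List.pyRange 0 Num_qubits 1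
  (PySem.List.pyRange 1 Num_qubits 1).foldl
    (fun subsys k =>
      if 2 * k < Num_qubits then
        subsys ++ PySem.List.combinations system k.toNat
      else if 2 * k = Num_qubits then
        subsys ++ (PySem.List.combinations system k.toNat).filter
          (fun c => decide (c < system.filter (fun i => !c.contains i)))
      else subsys)
    []

-- ===== PRECONDITION & SPEC =====
def Spec_generate_subsys (Num_qubits : Int) (out : List (List Int)) : Prop := out = generate_subsys_alt Num_qubits
instance (Num_qubits : Int) (out : List (List Int)) : Decidable (Spec_generate_subsys Num_qubits out) := by unfold Spec_generate_subsys; infer_instance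

-- ===== CLAIM (what is proved, stated in full; the proofs are below) =====
def Claim_equal_generate_subsys : Prop := ∀ (Num_qubits : Int), Dom_generate_subsys Num_qubits → Spec_generate_subsys Num_qubits (generate_subsys Num_qubits)

-- ===== LEMMAS AND PROOFS =====

/-! ### Part I: Python's str of an int tuple is injective on tuples of nonnegative ints -/

theorem pvDigitChar_isDigit : ∀ m : Nat, m < 10 → (Nat.digitChar m).isDigit = true := by decide
theorem pvDigitChar_val : ∀ m : Nat, m < 10 → (Nat.digitChar m).toNat - 48 = m := by decide

theorem pvCore_append (f : Nat) : ∀ (n : Nat) (acc : List Char),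
    Nat.toDigitsCore 10 f n acc = Nat.toDigitsCore 10 f n [] ++ acc := by
  induction f with
  | zero => intro n acc; simp [Nat.toDigitsCore]
  | succ f ih =>
    intro n acc
    simp only [Nat.toDigitsCore]
    split_ifs with h
    · rfl
    · rw [ih (n / 10) ((n % 10).digitChar :: acc), ih (n / 10) [(n % 10).digitChar]]
      simp

theorem pvCore_digits (f : Nat) : ∀ (n : Nat) (acc : List Char),
    (∀ c ∈ acc, c.isDigit = true) → ∀ c ∈ Nat.toDigitsCore 10 f n acc, c.isDigit = true := by
  induction f with
  | zero => intro n acc h; simpa [Nat.toDigitsCore] using h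
  | succ f ih =>
    intro n acc h
    have hd : (n % 10).digitChar.isDigit = true :=
      pvDigitChar_isDigit _ (Nat.mod_lt _ (by norm_num))
    simp only [Nat.toDigitsCore]
    split_ifs with hz
    · intro c hc
      rcases List.mem_cons.mp hc with hc | hc
      · simpa [hc] using hd
      · exact h c hc
    · refine ih (n / 10) _ ?_
      intro c hc
      rcases List.mem_cons.mp hc with hc | hc
      · simpa [hc] using hd
      · exact h c hc

def pvVal (cs : List Char) : Nat := cs.foldl (fun a c => 10 * a + (c.toNat - 48)) 0

theorem pvCore_val (f : Nat) : ∀ n : Nat, n < 10 ^ f →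
    pvVal (Nat.toDigitsCore 10 f n []) = n := by
  induction f with
  | zero => intro n hn; interval_cases n; simp [Nat.toDigitsCore, pvVal]
  | succ f ih =>
    intro n hn
    simp only [Nat.toDigitsCore]
    split_ifs with hz
    · have h10 : n < 10 := by omega
      simp [pvVal, pvDigitChar_val (n % 10) (Nat.mod_lt _ (by norm_num))]
      omega
    · rw [pvCore_append]
      have hdiv : n / 10 < 10 ^ f := by
        rw [Nat.div_lt_iff_lt_mul (by norm_num)]
        calc n < 10 ^ (f + 1) := hn
        _ = 10 ^ f * 10 := by ring
      have := ih (n / 10) hdiv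
      simp only [pvVal, List.foldl_append] at *
      simp [this, pvDigitChar_val (n % 10) (Nat.mod_lt _ (by norm_num))]
      omega

theorem pvToChars_eq (i : Int) (h : 0 ≤ i) :
    PySem.Int.toChars i = Nat.toDigits 10 i.toNat := by
  simp [PySem.Int.toChars, not_lt.mpr h]

theorem pvNat_lt_pow (m : Nat) : m < 10 ^ (m + 1) := by
  calc m < 2 ^ m := Nat.lt_two_pow_self
  _ ≤ 10 ^ m := Nat.pow_le_pow_left (by norm_num) m
  _ ≤ 10 ^ (m + 1) := Nat.pow_le_pow_right (by norm_num) (by omega)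

theorem pvToDigits_ne_nil (m : Nat) : Nat.toDigits 10 m ≠ [] := by
  show Nat.toDigitsCore 10 (m + 1) m [] ≠ []
  simp only [Nat.toDigitsCore]
  split_ifs with h
  · simp
  · rw [pvCore_append]
    simp

theorem pvToDigits_inj (m n : Nat) (h : Nat.toDigits 10 m = Nat.toDigits 10 n) : m = n := by
  have hm := pvCore_val (m + 1) m (pvNat_lt_pow m)
  have hn := pvCore_val (n + 1) n (pvNat_lt_pow n)
  rw [← hm, ← hn]
  exact congrArg pvVal h

theorem pvToChars_inj (i j : Int) (hi : 0 ≤ i) (hj : 0 ≤ j)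
    (h : PySem.Int.toChars i = PySem.Int.toChars j) : i = j := by
  rw [pvToChars_eq i hi, pvToChars_eq j hj] at h
  have := pvToDigits_inj _ _ h
  omega

theorem pvToChars_digit (i : Int) (h : 0 ≤ i) : ∀ c ∈ PySem.Int.toChars i, c.isDigit = true := by
  rw [pvToChars_eq i h]
  exact pvCore_digits _ _ _ (by simp)

theorem pvToChars_ne_nil (i : Int) (h : 0 ≤ i) : PySem.Int.toChars i ≠ [] := by
  rw [pvToChars_eq i h]; exact pvToDigits_ne_nil _

theorem pvComma_split : ∀ (xs ys as bs : List Char), (',' ∉ xs) → (',' ∉ ys) →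
    xs ++ ',' :: as = ys ++ ',' :: bs → xs = ys ∧ as = bs := by
  intro xs
  induction xs with
  | nil =>
    intro ys as bs _ hy h
    cases ys with
    | nil => simpa using h
    | cons y ys =>
      simp at h
      obtain ⟨h1, -⟩ := h
      subst h1
      simp at hy
  | cons x xs ih =>
    intro ys as bs hx hy h
    cases ys with
    | nil =>
      simp at h
      obtain ⟨h1, -⟩ := h
      subst h1
      simp at hx
    | cons y ys =>
      simp only [List.cons_append, List.cons.injEq] at h
      obtain ⟨rfl, h2⟩ := h
      have := ih ys as bs (fun hc => hx (List.mem_cons_of_mem _ hc))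
        (fun hc => hy (List.mem_cons_of_mem _ hc)) h2
      simp [this]

theorem pvDigit_ne_comma {c : Char} (h : c.isDigit = true) : c ≠ ',' := by
  intro hc; subst hc; simp at h

def pvAllNonneg (l : List Int) : Prop := ∀ i ∈ l, 0 ≤ i

theorem pvComma_mem_join (p q : List Char) (rest : List (List Char)) :
    ',' ∈ PySem.Chars.join [',', ' '] (p :: q :: rest) := by
  rw [PySem.Chars.join_cons_cons]
  simp

theorem pvJoin_inj : ∀ (l1 l2 : List (List Char)),
    (∀ p ∈ l1, p ≠ [] ∧ ',' ∉ p) → (∀ p ∈ l2, p ≠ [] ∧ ',' ∉ p) →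
    PySem.Chars.join [',', ' '] l1 = PySem.Chars.join [',', ' '] l2 → l1 = l2 := by
  intro l1
  induction l1 with
  | nil =>
    intro l2 _ h2 h
    cases l2 with
    | nil => rfl
    | cons q l2 =>
      rw [PySem.Chars.join_nil] at h
      cases l2 with
      | nil =>
        rw [PySem.Chars.join_singleton] at h
        exact absurd h.symm (h2 q (by simp)).1
      | cons r l2 =>
        rw [PySem.Chars.join_cons_cons] at h
        have : q = [] := by
          rcases List.append_eq_nil_iff.mp (List.append_eq_nil_iff.mp h.symm).1 with ⟨hq, -⟩
          exact hq
        exact absurd this (h2 q (by simp)).1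
  | cons p l1 ih =>
    intro l2 h1 h2 h
    cases l2 with
    | nil =>
      rw [PySem.Chars.join_nil] at h
      cases l1 with
      | nil =>
        rw [PySem.Chars.join_singleton] at h
        exact absurd h (h1 p (by simp)).1
      | cons r l1 =>
        rw [PySem.Chars.join_cons_cons] at h
        have : p = [] := (List.append_eq_nil_iff.mp (List.append_eq_nil_iff.mp h).1).1
        exact absurd this (h1 p (by simp)).1
    | cons q l2 =>
      cases l1 with
      | nil =>
        cases l2 with
        | nil =>
          rw [PySem.Chars.join_singleton, PySem.Chars.join_singleton] at h
          rw [h]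
        | cons r l2 =>
          rw [PySem.Chars.join_singleton] at h
          have hc : ',' ∈ p := h ▸ pvComma_mem_join q r l2
          exact absurd hc (h1 p (by simp)).2
      | cons r l1 =>
        cases l2 with
        | nil =>
          rw [PySem.Chars.join_singleton] at h
          have hc : ',' ∈ q := h ▸ pvComma_mem_join p r l1
          exact absurd hc (h2 q (by simp)).2
        | cons t l2 =>
          rw [PySem.Chars.join_cons_cons, PySem.Chars.join_cons_cons] at h
          have h' : p ++ ',' :: (' ' :: PySem.Chars.join [',', ' '] (r :: l1)) =
              q ++ ',' :: (' ' :: PySem.Chars.join [',', ' '] (t :: l2)) := by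
            simpa using h
          obtain ⟨hpq, htail⟩ := pvComma_split _ _ _ _ (h1 p (by simp)).2 (h2 q (by simp)).2 h'
          have := ih (t :: l2) (fun x hx => h1 x (List.mem_cons_of_mem _ hx))
            (fun x hx => h2 x (List.mem_cons_of_mem _ hx)) (by simpa using htail)
          rw [hpq, this]

/-! ### Part II: the stateful dict filter of A is a pure scan over the seen subsets -/

theorem pvNoComma (i : Int) (h : 0 ≤ i) : ',' ∉ PySem.Int.toChars i := by
  intro hc
  exact pvDigit_ne_comma (pvToChars_digit i h ',' hc) rfl

theorem pvChunks_ok (l : List Int) (h : pvAllNonneg l) :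
    ∀ p ∈ l.map PySem.Int.toChars, p ≠ [] ∧ ',' ∉ p := by
  intro p hp
  rcases List.mem_map.mp hp with ⟨i, hi, rfl⟩
  exact ⟨pvToChars_ne_nil i (h i hi), pvNoComma i (h i hi)⟩

theorem pvMapToChars_inj : ∀ (l1 l2 : List Int), pvAllNonneg l1 → pvAllNonneg l2 →
    l1.map PySem.Int.toChars = l2.map PySem.Int.toChars → l1 = l2 := by
  intro l1
  induction l1 with
  | nil => intro l2 _ _ h; cases l2 <;> simp_all
  | cons a l1 ih =>
    intro l2 h1 h2 h
    cases l2 with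
    | nil => simp at h
    | cons b l2 =>
      simp only [List.map_cons, List.cons.injEq] at h
      have hab := pvToChars_inj a b (h1 a (by simp)) (h2 b (by simp)) h.1
      have := ih l2 (fun i hi => h1 i (List.mem_cons_of_mem _ hi))
        (fun i hi => h2 i (List.mem_cons_of_mem _ hi)) h.2
      rw [hab, this]

theorem pvTupleChars_inj (l1 l2 : List Int) (h1 : pvAllNonneg l1) (h2 : pvAllNonneg l2)
    (h : pyTupleChars l1 = pyTupleChars l2) : l1 = l2 := by
  match l1, l2 with
  | [], [] => rfl
  | [], [b] =>
    simp only [pyTupleChars] at h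
    have hb := pvToChars_ne_nil b (h2 b (by simp))
    cases hcs : PySem.Int.toChars b with
    | nil => exact absurd hcs hb
    | cons c cs => rw [hcs] at h; simp at h
  | [b], [] =>
    simp only [pyTupleChars] at h
    have hb := pvToChars_ne_nil b (h1 b (by simp))
    cases hcs : PySem.Int.toChars b with
    | nil => exact absurd hcs hb
    | cons c cs => rw [hcs] at h; simp at h
  | [], (b :: c :: r) =>
    simp only [pyTupleChars] at h
    have := pvComma_mem_join (PySem.Int.toChars b) (PySem.Int.toChars c) (r.map PySem.Int.toChars)
    simp only [List.map_cons] at h ⊢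
    have h' : ([')'] : List Char) = PySem.Chars.join [',', ' '] (PySem.Int.toChars b :: PySem.Int.toChars c :: r.map PySem.Int.toChars) ++ [')'] := by
      simpa using h
    have hnil := List.self_eq_append_left.mp h'
    rw [hnil] at this
    simp at this
  | (b :: c :: r), [] =>
    simp only [pyTupleChars] at h
    have := pvComma_mem_join (PySem.Int.toChars b) (PySem.Int.toChars c) (r.map PySem.Int.toChars)
    have h' : PySem.Chars.join [',', ' '] (PySem.Int.toChars b :: PySem.Int.toChars c :: r.map PySem.Int.toChars) ++ [')'] = ([')'] : List Char) := by
      simpa using h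
    have hnil := List.append_left_eq_self.mp h'
    rw [hnil] at this
    simp at this
  | [a], [b] =>
    simp only [pyTupleChars, List.cons.injEq, true_and] at h
    have := List.append_inj_left' h (by simp)
    exact by rw [pvToChars_inj a b (h1 a (by simp)) (h2 b (by simp)) this]
  | [a], (b :: c :: r) =>
    simp only [pyTupleChars, List.cons.injEq, true_and, List.map_cons] at h
    rw [PySem.Chars.join_cons_cons] at h
    have h' : PySem.Int.toChars a ++ ',' :: [')'] =
        PySem.Int.toChars b ++ ',' :: (' ' :: (PySem.Chars.join [',', ' '] (PySem.Int.toChars c :: r.map PySem.Int.toChars) ++ [')'])) := by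
      simpa using h
    have := (pvComma_split _ _ _ _ (pvNoComma a (h1 a (by simp))) (pvNoComma b (h2 b (by simp))) h').2
    simp at this
  | (b :: c :: r), [a] =>
    simp only [pyTupleChars, List.cons.injEq, true_and, List.map_cons] at h
    rw [PySem.Chars.join_cons_cons] at h
    have h' : PySem.Int.toChars b ++ ',' :: (' ' :: (PySem.Chars.join [',', ' '] (PySem.Int.toChars c :: r.map PySem.Int.toChars) ++ [')'])) =
        PySem.Int.toChars a ++ ',' :: [')'] := by
      simpa using h
    have := (pvComma_split _ _ _ _ (pvNoComma b (h1 b (by simp))) (pvNoComma a (h2 a (by simp))) h').2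
    simp at this
  | (a :: a' :: ra), (b :: b' :: rb) =>
    simp only [pyTupleChars, List.cons.injEq, true_and] at h
    have hj := List.append_inj_left' h (by simp)
    have := pvJoin_inj _ _ (pvChunks_ok _ h1) (pvChunks_ok _ h2) hj
    exact pvMapToChars_inj _ _ h1 h2 this

theorem pvTupleStr_inj (l1 l2 : List Int) (h1 : pvAllNonneg l1) (h2 : pvAllNonneg l2)
    (h : pyTupleStr l1 = pyTupleStr l2) : l1 = l2 := by
  apply pvTupleChars_inj l1 l2 h1 h2
  have := congrArg String.toList h
  simpa [pyTupleStr] using this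

def pvComp (sys x : List Int) : List Int := sys.filter (fun i => !x.contains i)

def pvScan (sys : List Int) : List (List Int) → List (List Int) → List (List Int)
  | _, [] => []
  | seen, x :: L =>
      (if x ∈ seen ∨ pvComp sys x ∈ seen then [] else [x]) ++
        pvScan sys (pvComp sys x :: x :: seen) L

def pvAfter (sys : List Int) (seen : List (List Int)) (L : List (List Int)) : List (List Int) :=
  L.foldl (fun s x => pvComp sys x :: x :: s) seen

theorem pvScan_append (sys : List Int) : ∀ (L1 L2 seen : List (List Int)),
    pvScan sys seen (L1 ++ L2) = pvScan sys seen L1 ++ pvScan sys (pvAfter sys seen L1) L2 := by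
  intro L1
  induction L1 with
  | nil => intro L2 seen; simp [pvScan, pvAfter]
  | cons x L1 ih =>
    intro L2 seen
    simp only [List.cons_append, pvScan]
    rw [ih]
    have : pvAfter sys seen (x :: L1) = pvAfter sys (pvComp sys x :: x :: seen) L1 := rfl
    rw [this, List.append_assoc]

theorem pvMem_after (sys : List Int) : ∀ (L seen : List (List Int)) (z : List Int),
    z ∈ pvAfter sys seen L ↔ z ∈ seen ∨ ∃ y ∈ L, z = y ∨ z = pvComp sys y := by
  intro L
  induction L with
  | nil => intro seen z; simp [pvAfter]
  | cons x L ih =>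
    intro seen z
    have : pvAfter sys seen (x :: L) = pvAfter sys (pvComp sys x :: x :: seen) L := rfl
    rw [this, ih]
    constructor
    · rintro (h | h)
      · rcases List.mem_cons.mp h with h | h
        · exact Or.inr ⟨x, by simp, Or.inr h⟩
        · rcases List.mem_cons.mp h with h | h
          · exact Or.inr ⟨x, by simp, Or.inl h⟩
          · exact Or.inl h
      · rcases h with ⟨y, hy, hz⟩
        exact Or.inr ⟨y, List.mem_cons_of_mem _ hy, hz⟩
    · rintro (h | ⟨y, hy, hz⟩)
      · exact Or.inl (by simp [h])
      · rcases List.mem_cons.mp hy with rfl | hy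
        · rcases hz with rfl | rfl <;> simp
        · exact Or.inr ⟨y, hy, hz⟩

theorem pvGetD0 (a b : String) : PySem.List.pyGetD [a, b] 0 "" = a := by
  simp [PySem.List.pyGetD]

theorem pvGetD1 (a b : String) : PySem.List.pyGetD [a, b] 1 "" = b := by
  simp [PySem.List.pyGetD]

theorem pvFoldA_eq_scan (sys : List Int) :
    ∀ (L : List (List Int)) (acc : Array (List Int)) (d : Std.HashMap String Int)
      (seen : List (List Int)),
      (∀ s, d.contains s = true ↔ ∃ z ∈ seen, s = pyTupleStr z) →
      (∀ z ∈ seen, pvAllNonneg z) →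
      (∀ x ∈ L, pvAllNonneg x ∧ pvAllNonneg (pvComp sys x)) →
      (L.foldl (pvStepA sys) (acc, d)).1.toList = acc.toList ++ pvScan sys seen L := by
  intro L
  induction L with
  | nil => intro acc d seen _ _ _; simp [pvScan]
  | cons x L ih =>
    intro acc d seen hd hseen hL
    have hx := (hL x (by simp)).1
    have hcx := (hL x (by simp)).2
    have hkey : ∀ z : List Int, pvAllNonneg z →
        (d.contains (pyTupleStr z) = true ↔ z ∈ seen) := by
      intro z hz
      rw [hd]
      constructor
      · rintro ⟨w, hw, he⟩
        rwa [pvTupleStr_inj z w hz (hseen w hw) he]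
      · intro hzs; exact ⟨z, hzs, rfl⟩
    have hstep : pvStepA sys (acc, d) x =
        ((if x ∈ seen ∨ pvComp sys x ∈ seen then acc else acc.push x),
          (d.insert (pyTupleStr x) 1).insert (pyTupleStr (pvComp sys x)) 1) := by
      show ((if (d.contains (PySem.List.pyGetD [pyTupleStr x, pyTupleStr (pvComp sys x)] 0 "") ||
              d.contains (PySem.List.pyGetD [pyTupleStr x, pyTupleStr (pvComp sys x)] 1 "")) then acc else acc.push x),
          (d.insert (PySem.List.pyGetD [pyTupleStr x, pyTupleStr (pvComp sys x)] 0 "") 1).insert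
            (PySem.List.pyGetD [pyTupleStr x, pyTupleStr (pvComp sys x)] 1 "") 1) = _
      rw [pvGetD0, pvGetD1]
      have e1 := hkey x hx
      have e2 := hkey (pvComp sys x) hcx
      by_cases hm : x ∈ seen ∨ pvComp sys x ∈ seen
      · have hb : (d.contains (pyTupleStr x) || d.contains (pyTupleStr (pvComp sys x))) = true := by
          rcases hm with hm | hm
          · rw [e1.mpr hm]; simp
          · rw [e2.mpr hm]; simp
        rw [if_pos hb, if_pos hm]
      · have n1 : d.contains (pyTupleStr x) = false := by
          rcases Bool.eq_false_or_eq_true (d.contains (pyTupleStr x)) with h | h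
          · exact absurd (Or.inl (e1.mp h)) hm
          · exact h
        have n2 : d.contains (pyTupleStr (pvComp sys x)) = false := by
          rcases Bool.eq_false_or_eq_true (d.contains (pyTupleStr (pvComp sys x))) with h | h
          · exact absurd (Or.inr (e2.mp h)) hm
          · exact h
        rw [n1, n2, if_neg hm]
        rfl
    rw [List.foldl_cons, hstep]
    rw [ih _ _ (pvComp sys x :: x :: seen) ?_ ?_ (fun y hy => hL y (List.mem_cons_of_mem _ hy))]
    · simp only [pvScan]
      by_cases hm : x ∈ seen ∨ pvComp sys x ∈ seen <;> simp [hm]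
    · intro s
      rw [Std.HashMap.contains_insert, Std.HashMap.contains_insert]
      constructor
      · intro h
        rcases (by simpa using h : _ ∨ _) with h | h
        · exact ⟨pvComp sys x, by simp, by simpa using h.symm⟩
        · rcases (by simpa using h : _ ∨ _) with h | h
          · exact ⟨x, by simp, by simpa using h.symm⟩
          · rcases (hd s).mp h with ⟨z, hz, he⟩
            exact ⟨z, by simp [hz], he⟩
      · rintro ⟨z, hz, rfl⟩
        rcases List.mem_cons.mp hz with rfl | hz
        · simp
        · rcases List.mem_cons.mp hz with rfl | hz
          · simp
          · have : d.contains (pyTupleStr z) = true := (hd _).mpr ⟨z, hz, rfl⟩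
            simp [this]
    · intro z hz
      rcases List.mem_cons.mp hz with rfl | hz
      · exact hcx
      · rcases List.mem_cons.mp hz with rfl | hz
        · exact hx
        · exact hseen z hz

/-! ### Part III: combinatorics of the scan over the size-grouped combination list -/

theorem pvFilter_eq_of_sublist : ∀ (s l : List Int), l.Sublist s → s.Nodup →
    s.filter (fun i => l.contains i) = l := by
  intro s
  induction s with
  | nil => intro l hl _; simp_all
  | cons a s ih =>
    intro l hl hnd
    rcases List.sublist_cons_iff.mp hl with h | ⟨l', rfl, h⟩
    · have ha : a ∉ l := fun hm => (List.nodup_cons.mp hnd).1 (h.subset hm)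
      rw [List.filter_cons]
      simp only [List.contains_eq_mem, decide_eq_true_eq] at *
      rw [if_neg (by simpa using ha)]
      exact ih l h (List.nodup_cons.mp hnd).2
    · rw [List.filter_cons]
      have : (a :: l').contains a = true := by simp
      rw [if_pos this]
      congr 1
      have hrest : ∀ x ∈ s, ((a :: l').contains x) = (l'.contains x) := by
        intro x hx
        have hxa : x ≠ a := by
          rintro rfl
          exact (List.nodup_cons.mp hnd).1 hx
        simp [hxa]
      rw [List.filter_congr hrest]
      exact ih l' h (List.nodup_cons.mp hnd).2

theorem pvComp_length (s l : List Int) (hl : l.Sublist s) (hs : s.Nodup) :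
    (pvComp s l).length + l.length = s.length := by
  have h1 : s.filter (fun i => l.contains i) = l := pvFilter_eq_of_sublist s l hl hs
  have h2 := List.length_eq_length_filter_add (l := s) (fun i => l.contains i)
  rw [h1] at h2
  rw [pvComp]
  omega

theorem pvComp_comp (s l : List Int) (hl : l.Sublist s) (hs : s.Nodup) :
    pvComp s (pvComp s l) = l := by
  have : ∀ x ∈ s, (!(pvComp s l).contains x) = l.contains x := by
    intro x hx
    by_cases hm : x ∈ l
    · simp [pvComp, hm, hx]
    · simp [pvComp, hm, hx]
  rw [pvComp, List.filter_congr this]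
  exact pvFilter_eq_of_sublist s l hl hs

theorem pvComp_sublist (s l : List Int) : (pvComp s l).Sublist s := List.filter_sublist

theorem pvComp_mem_comb (s l : List Int) (r : Nat) (hs : s.Nodup)
    (h : l ∈ PySem.List.combinations s r) :
    pvComp s l ∈ PySem.List.combinations s (s.length - r) := by
  rcases (PySem.List.mem_combinations_iff s r l).mp h with ⟨hsub, hlen⟩
  refine (PySem.List.mem_combinations_iff s _ _).mpr ⟨pvComp_sublist s l, ?_⟩
  have := pvComp_length s l hsub hs
  omega

theorem pvComp_ne_self (s l : List Int) (h : l ≠ []) : pvComp s l ≠ l := by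
  intro he
  rcases List.exists_mem_of_ne_nil l h with ⟨e, he'⟩
  have : e ∈ pvComp s l := by rw [he]; exact he'
  simp [pvComp] at this
  exact this.2 he'

theorem pvMemComb_ne_nil (s l : List Int) (r : Nat) (hr : 1 ≤ r)
    (h : l ∈ PySem.List.combinations s r) : l ≠ [] := by
  rcases (PySem.List.mem_combinations_iff s r l).mp h with ⟨-, hlen⟩
  intro he; subst he; simp at hlen; omega

theorem pvCombinations_pairwise : ∀ (xs : List Int) (r : Nat), xs.Pairwise (· < ·) →
    (PySem.List.combinations xs r).Pairwise (· < ·) := by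
  intro xs
  induction xs with
  | nil =>
    intro r _
    cases r with
    | zero => simp [PySem.List.combinations_zero]
    | succ r => simp [PySem.List.combinations_nil_succ]
  | cons x xs ih =>
    intro r hp
    cases r with
    | zero => simp [PySem.List.combinations_zero]
    | succ r =>
      rw [PySem.List.combinations_cons_succ]
      have hx : ∀ y ∈ xs, x < y := fun y hy => (List.pairwise_cons.mp hp).1 y hy
      have hxs : xs.Pairwise (· < ·) := (List.pairwise_cons.mp hp).2
      apply List.pairwise_append.mpr
      refine ⟨?_, ih (r+1) hxs, ?_⟩
      · rw [List.pairwise_map]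
        exact (ih r hxs).imp (fun {a b} hab => List.cons_lt_cons_self.mpr hab)
      · intro a ha b hb
        rcases List.mem_map.mp ha with ⟨c, hc, rfl⟩
        rcases (PySem.List.mem_combinations_iff _ _ _).mp hb with ⟨hbsub, hblen⟩
        have hbne : b ≠ [] := by
          intro he; subst he; simp at hblen
        rcases List.exists_cons_of_ne_nil hbne with ⟨h0, t0, rfl⟩
        have hh : h0 ∈ xs := hbsub.subset (by simp)
        rw [List.cons_lt_cons_iff]
        exact Or.inl (hx h0 hh)

theorem pvScan_all (sys : List Int) : ∀ (L s : List (List Int)),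
    (∀ x ∈ L, x ∉ s ∧ pvComp sys x ∉ s) → L.Nodup →
    (∀ x ∈ L, ∀ y ∈ L, pvComp sys x ≠ y) →
    (∀ x ∈ L, ∀ y ∈ L, pvComp sys x = pvComp sys y → x = y) →
    pvScan sys s L = L := by
  intro L
  induction L with
  | nil => intro s _ _ _ _; rfl
  | cons x L ih =>
    intro s hs hnd hcc hinj
    have hx := hs x (by simp)
    simp only [pvScan]
    rw [if_neg (by tauto)]
    have : pvScan sys (pvComp sys x :: x :: s) L = L := by
      apply ih
      · intro y hy
        have hys := hs y (List.mem_cons_of_mem _ hy)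
        refine ⟨?_, ?_⟩
        · intro hm
          rcases List.mem_cons.mp hm with hm1 | hm
          · exact hcc x (by simp) y (List.mem_cons_of_mem _ hy) hm1.symm
          · rcases List.mem_cons.mp hm with rfl | hm
            · exact (List.nodup_cons.mp hnd).1 hy
            · exact hys.1 hm
        · intro hm
          rcases List.mem_cons.mp hm with hm | hm
          · have := hinj y (List.mem_cons_of_mem _ hy) x (by simp) hm
            subst this
            exact (List.nodup_cons.mp hnd).1 hy
          · rcases List.mem_cons.mp hm with hm | hm
            · exact hcc y (List.mem_cons_of_mem _ hy) x (by simp) hm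
            · exact hys.2 hm
      · exact (List.nodup_cons.mp hnd).2
      · intro a ha b hb
        exact hcc a (List.mem_cons_of_mem _ ha) b (List.mem_cons_of_mem _ hb)
      · intro a ha b hb
        exact hinj a (List.mem_cons_of_mem _ ha) b (List.mem_cons_of_mem _ hb)
    rw [this]
    rfl

theorem pvScan_none (sys : List Int) : ∀ (L s s' : List (List Int)),
    (∀ z ∈ s, z ∈ s') → (∀ x ∈ L, x ∈ s ∨ pvComp sys x ∈ s) →
    pvScan sys s' L = [] := by
  intro L
  induction L with
  | nil => intro s s' _ _; rfl
  | cons x L ih =>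
    intro s s' hss hL
    simp only [pvScan]
    rw [if_pos]
    · refine ih s _ (fun z hz => ?_) (fun y hy => hL y (List.mem_cons_of_mem _ hy))
      exact List.mem_cons_of_mem _ (List.mem_cons_of_mem _ (hss z hz))
    · rcases hL x (by simp) with h | h
      · exact Or.inl (hss _ h)
      · exact Or.inr (hss _ h)

theorem pvAfter_snoc (sys : List Int) (s : List (List Int)) (P : List (List Int)) (x : List Int) :
    pvAfter sys s (P ++ [x]) = pvComp sys x :: x :: pvAfter sys s P := by
  simp [pvAfter, List.foldl_append]

theorem pvScan_half (sys : List Int) (k : Nat) (hk : 1 ≤ k) (hnd : sys.Nodup) :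
    ∀ (L P s : List (List Int)),
    P ++ L = PySem.List.combinations sys k →
    (PySem.List.combinations sys k).Pairwise (· < ·) →
    (∀ x ∈ PySem.List.combinations sys k,
        x ∉ s ∧ pvComp sys x ∉ s ∧ pvComp sys x ∈ PySem.List.combinations sys k) →
    pvScan sys (pvAfter sys s P) L = L.filter (fun x => decide (x < pvComp sys x)) := by
  intro L
  induction L with
  | nil => intro P s _ _ _; rfl
  | cons x L ih =>
    intro P s hPL hpw hC
    have hxC : x ∈ PySem.List.combinations sys k := by rw [← hPL]; simp
    have hcompC := (hC x hxC).2.2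
    have hxnot := (hC x hxC).1
    have hcnot := (hC x hxC).2.1
    have hxnil : x ≠ [] := pvMemComb_ne_nil sys x k hk hxC
    have hPC : ∀ y ∈ P, y ∈ PySem.List.combinations sys k := by
      intro y hy; rw [← hPL]; exact List.mem_append_left _ hy
    have hinv : ∀ y ∈ PySem.List.combinations sys k, pvComp sys (pvComp sys y) = y := by
      intro y hy
      exact pvComp_comp sys y ((PySem.List.mem_combinations_iff _ _ _).mp hy).1 hnd
    have hnodC : (PySem.List.combinations sys k).Nodup :=
      hpw.imp (fun {a b} hab => ne_of_lt hab)
    have hsplit : (P ++ x :: L).Nodup := by rw [hPL]; exact hnodC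
    have hxP : x ∉ P := by
      intro hm
      have := List.disjoint_of_nodup_append hsplit hm (by simp)
      exact this
    have hpw' : (P ++ x :: L).Pairwise (· < ·) := by rw [hPL]; exact hpw
    have hcross : ∀ a ∈ P, ∀ b ∈ x :: L, a < b :=
      fun a ha b hb => (List.pairwise_append.mp hpw').2.2 a ha b hb
    have hxL : ∀ b ∈ L, x < b := by
      have := (List.pairwise_append.mp hpw').2.1
      exact (List.pairwise_cons.mp this).1
    have hcond : (x ∈ pvAfter sys s P ∨ pvComp sys x ∈ pvAfter sys s P) ↔ pvComp sys x ∈ P := by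
      constructor
      · rintro (h | h)
        · rcases (pvMem_after sys P s x).mp h with h | ⟨y, hyP, he⟩
          · exact absurd h hxnot
          · rcases he with rfl | he
            · exact absurd hyP hxP
            · rw [he, hinv y (hPC y hyP)]
              exact hyP
        · rcases (pvMem_after sys P s _).mp h with h | ⟨y, hyP, he⟩
          · exact absurd h hcnot
          · rcases he with he | he
            · rw [he]; exact hyP
            · have := congrArg (pvComp sys) he
              rw [hinv x hxC, hinv y (hPC y hyP)] at this
              subst this
              exact absurd hyP hxP
      · intro h
        exact Or.inr ((pvMem_after sys P s _).mpr (Or.inr ⟨pvComp sys x, h, Or.inl rfl⟩))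
    have hrec : pvScan sys (pvComp sys x :: x :: pvAfter sys s P) L =
        L.filter (fun x => decide (x < pvComp sys x)) := by
      rw [← pvAfter_snoc]
      exact ih (P ++ [x]) s (by rw [List.append_assoc]; simpa using hPL) hpw hC
    simp only [pvScan]
    by_cases hm : pvComp sys x ∈ P
    · rw [if_pos (hcond.mpr hm)]
      have hnotlt : ¬ (x < pvComp sys x) := by
        have : pvComp sys x < x := hcross _ hm x (by simp)
        exact lt_asymm this
      rw [List.filter_cons, if_neg (by simpa using hnotlt)]
      simpa using hrec
    · rw [if_neg (fun hc => hm (hcond.mp hc))]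
      have hlt : x < pvComp sys x := by
        have : pvComp sys x ∈ P ++ x :: L := by rw [hPL]; exact hcompC
        rcases List.mem_append.mp this with h | h
        · exact absurd h hm
        · rcases List.mem_cons.mp h with h | h
          · exact absurd h (pvComp_ne_self sys x hxnil)
          · exact hxL _ h
      rw [List.filter_cons, if_pos (by simpa using hlt)]
      rw [hrec]
      rfl

def pvPref (sys : List Int) (m : Nat) : List (List Int) :=
  (List.range m).flatMap (fun i => PySem.List.combinations sys (i + 1))

def pvH (sys : List Int) (k : Nat) : List (List Int) :=
  if 2 * k < sys.length then PySem.List.combinations sys k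
  else if 2 * k = sys.length then
    (PySem.List.combinations sys k).filter (fun c => decide (c < pvComp sys c))
  else []

theorem pvMem_after_pref (sys : List Int) (hnd : sys.Nodup) (m : Nat) (z : List Int) :
    z ∈ pvAfter sys [] (pvPref sys m) ↔
      ∃ i < m, z.Sublist sys ∧ (z.length = i + 1 ∨ z.length + (i + 1) = sys.length) := by
  rw [pvMem_after]
  simp only [List.mem_nil_iff, false_or, pvPref, List.mem_flatMap, List.mem_range]
  constructor
  · rintro ⟨y, ⟨i, hi, hyC⟩, he⟩
    rcases (PySem.List.mem_combinations_iff _ _ _).mp hyC with ⟨hysub, hylen⟩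
    rcases he with rfl | rfl
    · exact ⟨i, hi, hysub, Or.inl hylen⟩
    · refine ⟨i, hi, List.filter_sublist, Or.inr ?_⟩
      have := pvComp_length sys y hysub hnd
      omega
  · rintro ⟨i, hi, hzsub, hlen | hlen⟩
    · exact ⟨z, ⟨i, hi, (PySem.List.mem_combinations_iff _ _ _).mpr ⟨hzsub, hlen⟩⟩, Or.inl rfl⟩
    · refine ⟨pvComp sys z, ⟨i, hi, ?_⟩, Or.inr ?_⟩
      · refine (PySem.List.mem_combinations_iff _ _ _).mpr ⟨List.filter_sublist, ?_⟩
        have := pvComp_length sys z hzsub hnd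
        omega
      · rw [pvComp_comp sys z hzsub hnd]

theorem pvScan_groups (sys : List Int) (hp : sys.Pairwise (· < ·)) :
    ∀ m : Nat, m + 1 ≤ sys.length →
    pvScan sys [] (pvPref sys m) = (List.range m).flatMap (fun i => pvH sys (i + 1)) := by
  have hnd : sys.Nodup := hp.imp (fun {a b} h => ne_of_lt h)
  intro m
  induction m with
  | zero => intro _; rfl
  | succ m ih =>
    intro hm
    have hPref : pvPref sys (m + 1) = pvPref sys m ++ PySem.List.combinations sys (m + 1) := by
      simp [pvPref, List.range_succ]
    have hRHS : (List.range (m + 1)).flatMap (fun i => pvH sys (i + 1)) =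
        (List.range m).flatMap (fun i => pvH sys (i + 1)) ++ pvH sys (m + 1) := by
      simp [List.range_succ]
    rw [hPref, pvScan_append, hRHS, ih (by omega)]
    congr 1
    -- the (m+1)-sized group
    set k := m + 1 with hkdef
    set N := sys.length with hNdef
    have hkN : k ≤ N - 1 := by omega
    have hpwC := pvCombinations_pairwise sys k hp
    have hnodC : (PySem.List.combinations sys k).Nodup :=
      hpwC.imp (fun {a b} h => ne_of_lt h)
    have hlen_of_mem : ∀ x ∈ PySem.List.combinations sys k,
        x.Sublist sys ∧ x.length = k := fun x hx =>
      (PySem.List.mem_combinations_iff _ _ _).mp hx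
    have hclen : ∀ x ∈ PySem.List.combinations sys k,
        (pvComp sys x).length + k = N := by
      intro x hx
      have h1 := (hlen_of_mem x hx).2
      have := pvComp_length sys x (hlen_of_mem x hx).1 hnd
      omega
    rcases lt_trichotomy (2 * k) N with hcase | hcase | hcase
    · -- 2k < N : everything is kept
      rw [show pvH sys k = PySem.List.combinations sys k from if_pos hcase]
      apply pvScan_all
      · intro x hx
        constructor
        · intro hmem
          rcases (pvMem_after_pref sys hnd m x).mp hmem with ⟨i, hi, -, hl | hl⟩
          · have := (hlen_of_mem x hx).2; omega
          · have := (hlen_of_mem x hx).2; omega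
        · intro hmem
          rcases (pvMem_after_pref sys hnd m _).mp hmem with ⟨i, hi, -, hl | hl⟩
          · have := hclen x hx; omega
          · have := hclen x hx; omega
      · exact hnodC
      · intro x hx y hy he
        have h1 := hclen x hx
        have h2 := (hlen_of_mem y hy).2
        rw [he] at h1
        omega
      · intro x hx y hy he
        have := congrArg (pvComp sys) he
        rwa [pvComp_comp sys x (hlen_of_mem x hx).1 hnd,
          pvComp_comp sys y (hlen_of_mem y hy).1 hnd] at this
    · -- 2k = N : keep the lexicographically smaller of each pair
      rw [show pvH sys k =
        (PySem.List.combinations sys k).filter (fun c => decide (c < pvComp sys c)) from by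
          rw [pvH, if_neg (by omega), if_pos hcase]]
      have := pvScan_half sys k (by omega) hnd (PySem.List.combinations sys k) []
        (pvAfter sys [] (pvPref sys m)) (by simp) hpwC ?_
      · exact this
      · intro x hx
        refine ⟨?_, ?_, ?_⟩
        · intro hmem
          rcases (pvMem_after_pref sys hnd m x).mp hmem with ⟨i, hi, -, hl | hl⟩
          · have := (hlen_of_mem x hx).2; omega
          · have := (hlen_of_mem x hx).2; omega
        · intro hmem
          rcases (pvMem_after_pref sys hnd m _).mp hmem with ⟨i, hi, -, hl | hl⟩
          · have := hclen x hx; omega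
          · have := hclen x hx; omega
        · have := pvComp_mem_comb sys x k hnd hx
          have heq : N - k = k := by omega
          rwa [← hNdef, heq] at this
    · -- 2k > N : everything was already seen (as a complement)
      rw [show pvH sys k = [] from by rw [pvH, if_neg (by omega), if_neg (by omega)]]
      apply pvScan_none sys _ (pvAfter sys [] (pvPref sys m)) _ (fun z hz => hz)
      intro x hx
      left
      refine (pvMem_after_pref sys hnd m x).mpr ⟨N - k - 1, by omega, (hlen_of_mem x hx).1, Or.inr ?_⟩
      have := (hlen_of_mem x hx).2
      omega

/-! ### Assembly -/

theorem pvA_eq (n : Int) : generate_subsys n =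
    pvScan (PySem.List.pyRange 0 n 1) [] (pvPref (PySem.List.pyRange 0 n 1) (n - 1).toNat) := by
  show ((((PySem.List.pyRange 0 (n - 1) 1).foldl
      (fun acc jj => acc ++ PySem.List.combinations (PySem.List.pyRange 0 n 1) (jj + 1).toNat) []).foldl
      (pvStepA (PySem.List.pyRange 0 n 1)) (#[], ∅))).1.toList = _
  rw [PySem.List.foldl_append_eq_flatMap]
  have hL : (PySem.List.pyRange 0 (n-1) 1).flatMap
      (fun jj => PySem.List.combinations (PySem.List.pyRange 0 n 1) (jj + 1).toNat) =
      pvPref (PySem.List.pyRange 0 n 1) (n - 1).toNat := by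
    rw [PySem.List.pyRange_one 0 (n-1), List.flatMap_map, pvPref]
    simp only [sub_zero]
    apply List.flatMap_congr
    intro i hi
    congr 1
    omega
  rw [List.nil_append, hL]
  have := pvFoldA_eq_scan (PySem.List.pyRange 0 n 1)
    (pvPref (PySem.List.pyRange 0 n 1) (n - 1).toNat) #[] ∅ [] ?_ ?_ ?_
  · simpa using this
  · intro s
    simp
  · intro z hz; simp at hz
  · intro x hx
    have hsysnn : pvAllNonneg (PySem.List.pyRange 0 n 1) := by
      intro i hi
      exact (PySem.List.mem_pyRange_one.mp hi).1
    rcases List.mem_flatMap.mp hx with ⟨i, -, hxC⟩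
    constructor
    · intro j hj
      exact hsysnn j (((PySem.List.mem_combinations_iff _ _ _).mp hxC).1.subset hj)
    · intro j hj
      exact hsysnn j (List.filter_sublist.subset hj)

theorem pvB_eq (n : Int) : generate_subsys_alt n =
    (List.range (n - 1).toNat).flatMap (fun i => pvH (PySem.List.pyRange 0 n 1) (i + 1)) := by
  show (PySem.List.pyRange 1 n 1).foldl _ [] = _
  have hstep : ∀ (acc : List (List Int)) (k : Int), 1 ≤ k →
      (if 2 * k < n then
        acc ++ PySem.List.combinations (PySem.List.pyRange 0 n 1) k.toNat
      else if 2 * k = n then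
        acc ++ (PySem.List.combinations (PySem.List.pyRange 0 n 1) k.toNat).filter
          (fun c => decide (c < (PySem.List.pyRange 0 n 1).filter (fun i => !c.contains i)))
      else acc) = acc ++ pvH (PySem.List.pyRange 0 n 1) k.toNat := by
    intro acc k hk
    have hN : (PySem.List.pyRange 0 n 1).length = n.toNat := by
      rw [PySem.List.length_pyRange_one]
      omega
    rw [pvH, hN]
    rcases lt_trichotomy (2 * k) n with hc | hc | hc
    · rw [if_pos hc, if_pos (by omega)]
    · rw [if_neg (by omega), if_pos hc, if_neg (by omega), if_pos (by omega)]
      rfl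
    · rw [if_neg (by omega), if_neg (by omega), if_neg (by omega), if_neg (by omega)]
      simp
  calc (PySem.List.pyRange 1 n 1).foldl _ []
      = (PySem.List.pyRange 1 n 1).foldl
          (fun acc k => acc ++ pvH (PySem.List.pyRange 0 n 1) k.toNat) [] := by
        apply PySem.List.foldl_congr_mem
        intro acc k hk
        exact hstep acc k (by have := PySem.List.mem_pyRange_one.mp hk; omega)
    _ = (PySem.List.pyRange 1 n 1).flatMap (fun k => pvH (PySem.List.pyRange 0 n 1) k.toNat) := by
        rw [PySem.List.foldl_append_eq_flatMap]; rfl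
    _ = (List.range (n - 1).toNat).flatMap (fun i => pvH (PySem.List.pyRange 0 n 1) (i + 1)) := by
        rw [PySem.List.pyRange_one 1 n, List.flatMap_map]
        apply List.flatMap_congr
        intro i hi
        congr 1
        omega

-- ===== VERDICT (by name: the statement is the Claim_ definition above) =====
theorem generate_subsys_spec : Claim_equal_generate_subsys := by
  unfold Claim_equal_generate_subsys
  intro n _
  show generate_subsys n = generate_subsys_alt n
  rw [pvA_eq, pvB_eq]
  by_cases hn : n ≤ 0
  case pos =>
    have hm : (n - 1).toNat = 0 := by omega
    rw [hm]
    rfl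
  case neg =>
    apply pvScan_groups
    · exact PySem.List.pairwise_lt_pyRange_one 0 n
    · rw [PySem.List.length_pyRange_one]
      omega
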